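-- pv_equiv track=rewrite | github.com/APodolskiy/programming_problems | stepik_course/acm_stud.py | solve
-- ===== SOURCE A (Python) =====
-- from typing import List
--
-- def solve(time: int, probs: List[int]):
--     probs.sort()
--     cur_time = 0
--     penalty = 0
--     num_tasks = 0
--     for prob in probs:
--         if prob > time - cur_time:
--             break
--         penalty += prob + cur_time
--         cur_time += prob
--         num_tasks += 1
--     return penalty, num_tasks
-- ===== SOURCE B (Python) =====
-- from typing import List
-- from itertools import accumulate
--
-- def solve(time: int, probs: List[int]):
--     probs.sort()
--     ps = list(accumulate(probs))
--     k = len(ps)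
--     for i, c in enumerate(ps):
--         if c > time:
--             k = i
--             break
--     return sum(ps[:k]), k
-- ===== Notes on version B (the rewrite author's own statement) =====
-- stated objective: alternative
-- what changed: Replaces the fused greedy loop carrying (cur_time, penalty, num_tasks) with a two-phase decomposition: build the full prefix-sum table with itertools.accumulate, locate the first entry exceeding time, and return the sum and length of the prefix before it.
import Mathlib
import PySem

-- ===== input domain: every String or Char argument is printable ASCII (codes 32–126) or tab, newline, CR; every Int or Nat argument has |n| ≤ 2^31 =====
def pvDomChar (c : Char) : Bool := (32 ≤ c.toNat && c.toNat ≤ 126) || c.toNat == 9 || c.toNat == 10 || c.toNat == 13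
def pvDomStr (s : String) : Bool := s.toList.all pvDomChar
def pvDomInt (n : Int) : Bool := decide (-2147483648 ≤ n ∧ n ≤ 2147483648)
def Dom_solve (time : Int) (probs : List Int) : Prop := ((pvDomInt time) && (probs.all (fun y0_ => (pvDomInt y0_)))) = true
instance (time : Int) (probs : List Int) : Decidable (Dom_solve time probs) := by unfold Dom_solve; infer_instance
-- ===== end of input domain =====

-- B rebuilds A's fused greedy loop as prefix-sum table + cut index + prefix sum; equivalence is
-- about the RETURN value only (both Pythons sort `probs` in place, the same observable mutation).

-- ===== PORT A =====
-- the for-loop of A: state (cur_time, penalty, num_tasks), break on prob > time - cur_time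
def solveLoop (time : Int) : List Int → Int → Int → Int → Int × Int
  | [], _, penalty, num => (penalty, num)
  | p :: rest, cur, penalty, num =>
    if p > time - cur then (penalty, num)
    else solveLoop time rest (cur + p) (penalty + (p + cur)) (num + 1)

def solve (time : Int) (probs : List Int) : Int × Int :=
  solveLoop time (PySem.List.sorted probs (fun x => x) false) 0 0 0

-- ===== PORT B =====
-- itertools.accumulate: running prefix sums
def prefixSums : List Int → Int → List Int
  | [], _ => []
  | p :: rest, acc => (acc + p) :: prefixSums rest (acc + p)

-- B's scan: k = len(ps), overwritten by the first index whose entry exceeds time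
def cutIndex (time : Int) : List Int → Nat
  | [] => 0
  | c :: rest => if c > time then 0 else cutIndex time rest + 1

def solve_alt (time : Int) (probs : List Int) : Int × Int :=
  let ps := prefixSums (PySem.List.sorted probs (fun x => x) false) 0
  let k := cutIndex time ps
  ((ps.take k).sum, (k : Int))

-- ===== PRECONDITION & SPEC =====
def Spec_solve (time : Int) (probs : List Int) (out : Int × Int) : Prop := out = solve_alt time probs
instance (time : Int) (probs : List Int) (out : Int × Int) : Decidable (Spec_solve time probs out) := by unfold Spec_solve; infer_instance

-- ===== CLAIM (what is proved, stated in full; the proofs are below) =====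
def Claim_equal_solve : Prop := ∀ (time : Int) (probs : List Int), Dom_solve time probs → Spec_solve time probs (solve time probs)

-- ===== LEMMAS AND PROOFS =====
theorem solveLoop_eq (time : Int) (l : List Int) :
    ∀ (cur penalty num : Int),
      solveLoop time l cur penalty num =
        (penalty + ((prefixSums l cur).take (cutIndex time (prefixSums l cur))).sum,
         num + (cutIndex time (prefixSums l cur) : Int)) := by
  induction l with
  | nil => intro cur penalty num; simp [solveLoop, prefixSums, cutIndex]
  | cons p rest ih =>
    intro cur penalty num
    simp only [solveLoop, prefixSums, cutIndex]
    by_cases h : p > time - cur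
    · have h' : cur + p > time := by omega
      simp [h, h']
    · have h' : ¬ cur + p > time := by omega
      simp only [if_neg h, if_neg h']
      rw [ih]
      simp [List.take_succ_cons]
      constructor <;> ring

-- ===== VERDICT (by name: the statement is the Claim_ definition above) =====
theorem solve_spec : Claim_equal_solve := by
  intro time probs _
  unfold Spec_solve solve solve_alt
  rw [solveLoop_eq]
  simp
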